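-- pv_equiv track=rewrite | github.com/dbaltaza/a-maze-ing | app/renderer_ascii.py | _path_sequence
-- ===== SOURCE A (Python) =====
-- def _path_sequence(
--     entry: tuple[int, int],
--     moves: str,
-- ) -> list[tuple[int, int]]:
--     """Expand an NESW move string into an ordered cell sequence."""
--     x, y = entry
--     cells: list[tuple[int, int]] = [(x, y)]
--     deltas = {"N": (0, -1), "E": (1, 0), "S": (0, 1), "W": (-1, 0)}
--     for step in moves:
--         if step not in deltas:
--             continue
--         dx, dy = deltas[step]
--         x += dx
--         y += dy
--         cells.append((x, y))
--     return cells
-- ===== SOURCE B (Python) =====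
-- def _path_sequence(entry, moves):
--     """Expand an NESW move string into an ordered cell sequence."""
--     valid = [c for c in moves if c in "NESW"]
--     xs = [entry[0]]
--     for c in valid:
--         xs.append(xs[-1] + (c == "E") - (c == "W"))
--     ys = [entry[1]]
--     for c in valid:
--         ys.append(ys[-1] + (c == "S") - (c == "N"))
--     return list(zip(xs, ys))
-- ===== Notes on version B (the rewrite author's own statement) =====
-- stated objective: alternative
-- what changed: Axis-split decomposition: the 2-D walk is decomposed into two independent 1-D coordinate sequences (x driven by E/W, y driven by N/S, each an arithmetic running sum over boolean comparisons, no delta table), which are then zipped into the cell list, instead of one loop mutating an (x,y) pair via a dict of delta vectors.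
import Mathlib
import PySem

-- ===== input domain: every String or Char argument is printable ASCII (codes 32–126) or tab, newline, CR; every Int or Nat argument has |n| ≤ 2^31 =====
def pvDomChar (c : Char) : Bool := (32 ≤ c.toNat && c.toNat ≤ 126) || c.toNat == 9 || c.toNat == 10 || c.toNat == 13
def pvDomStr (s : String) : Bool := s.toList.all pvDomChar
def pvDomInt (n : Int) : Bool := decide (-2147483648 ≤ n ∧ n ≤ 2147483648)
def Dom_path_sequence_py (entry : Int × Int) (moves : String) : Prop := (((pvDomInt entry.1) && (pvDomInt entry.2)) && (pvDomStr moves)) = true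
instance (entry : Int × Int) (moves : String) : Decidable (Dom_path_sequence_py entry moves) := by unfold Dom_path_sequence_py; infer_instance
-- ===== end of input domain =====

-- B decomposes the 2-D walk into two independent 1-D coordinate sequences (x from E/W,
-- y from N/S) that are zipped into cells; same values, equivalence proved on the domain.

-- ===== PORT A =====
-- A's dict literal {"N": (0,-1), "E": (1,0), "S": (0,1), "W": (-1,0)}
def pvDeltasA : PySem.Dict Char (Int × Int) :=
  PySem.Dict.ofList [('N', (0, -1)), ('E', (1, 0)), ('S', (0, 1)), ('W', (-1, 0))]

-- A's loop: state (x, y, cells); 'continue' on a step not in the dict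
def pvLoopA (x y : Int) (cells : List (Int × Int)) : List Char → List (Int × Int)
  | [] => cells
  | step :: rest =>
    match pvDeltasA.get? step with
    | none => pvLoopA x y cells rest
    | some (dx, dy) => pvLoopA (x + dx) (y + dy) (cells ++ [(x + dx, y + dy)]) rest

def path_sequence_py (entry : Int × Int) (moves : String) : List (Int × Int) :=
  pvLoopA entry.1 entry.2 [(entry.1, entry.2)] moves.toList

-- ===== PORT B =====
-- B's '(c == "E") - (c == "W")' and '(c == "S") - (c == "N")' boolean arithmetic
def pvDX (c : Char) : Int := (if c = 'E' then 1 else 0) - (if c = 'W' then 1 else 0)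
def pvDY (c : Char) : Int := (if c = 'S' then 1 else 0) - (if c = 'N' then 1 else 0)

-- B's per-axis loop: 'xs.append(xs[-1] + f(c))'; xs[-1] is pyGetD xs (-1)
def pvAxisB (f : Char → Int) : List Int → List Char → List Int
  | xs, [] => xs
  | xs, c :: rest => pvAxisB f (xs ++ [PySem.List.pyGetD xs (-1) 0 + f c]) rest

-- 'c in "NESW"' for a single char c is membership in the char list
def path_sequence_py_alt (entry : Int × Int) (moves : String) : List (Int × Int) :=
  let valid := moves.toList.filter (fun c => "NESW".toList.contains c)
  List.zip (pvAxisB pvDX [entry.1] valid) (pvAxisB pvDY [entry.2] valid)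

-- ===== PRECONDITION & SPEC =====
def Spec_path_sequence_py (entry : Int × Int) (moves : String) (out : List (Int × Int)) : Prop := out = path_sequence_py_alt entry moves
instance (entry : Int × Int) (moves : String) (out : List (Int × Int)) : Decidable (Spec_path_sequence_py entry moves out) := by unfold Spec_path_sequence_py; infer_instance

-- ===== CLAIM (what is proved, stated in full; the proofs are below) =====
def Claim_equal_path_sequence_py : Prop := ∀ (entry : Int × Int) (moves : String), Dom_path_sequence_py entry moves → Spec_path_sequence_py entry moves (path_sequence_py entry moves)

-- ===== LEMMAS AND PROOFS =====
theorem pvZipSnoc (L M : List Int) (a b : Int) (h : L.length = M.length) :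
    L.zip M ++ [(a, b)] = (L ++ [a]).zip (M ++ [b]) := by
  rw [List.zip_append h]; rfl

theorem pvLookup_eq (c : Char) :
    pvDeltasA.get? c =
      if "NESW".toList.contains c then some (pvDX c, pvDY c) else none := by
  by_cases hN : c = 'N'
  · subst hN; decide
  by_cases hE : c = 'E'
  · subst hE; decide
  by_cases hS : c = 'S'
  · subst hS; decide
  by_cases hW : c = 'W'
  · subst hW; decide
  simp [pvDeltasA, PySem.Dict.ofList, PySem.Dict.get?, PySem.Dict.update, PySem.Dict.empty,
    PySem.Dict.insert, hN, hE, hS, hW, Ne.symm]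

theorem pvLoopA_eq_zip (steps : List Char) :
    ∀ (x y : Int) (xs ys : List Int), xs.length = ys.length →
      pvLoopA x y ((xs ++ [x]).zip (ys ++ [y])) steps =
        List.zip (pvAxisB pvDX (xs ++ [x]) (steps.filter (fun c => "NESW".toList.contains c)))
                 (pvAxisB pvDY (ys ++ [y]) (steps.filter (fun c => "NESW".toList.contains c))) := by
  induction steps with
  | nil => intro x y xs ys h; rfl
  | cons c rest ih =>
    intro x y xs ys h
    by_cases hc : "NESW".toList.contains c = true
    · simp only [pvLoopA, pvLookup_eq, hc, if_true, List.filter_cons_of_pos hc, pvAxisB,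
        PySem.List.pyGetD_neg_one_append_singleton]
      rw [pvZipSnoc _ _ _ _ (by simp [h])]
      exact ih (x + pvDX c) (y + pvDY c) (xs ++ [x]) (ys ++ [y]) (by simp [h])
    · rw [List.filter_cons_of_neg (by simpa using hc)]
      simp only [pvLoopA, pvLookup_eq, hc, Bool.false_eq_true]
      exact ih x y xs ys h

-- ===== VERDICT (by name: the statement is the Claim_ definition above) =====
theorem path_sequence_py_spec : Claim_equal_path_sequence_py := by
  intro entry moves _
  unfold Spec_path_sequence_py path_sequence_py path_sequence_py_alt
  have := pvLoopA_eq_zip moves.toList entry.1 entry.2 [] [] rfl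
  simpa using this
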